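-- pv_equiv track=rewrite | github.com/ShabbirHasan1/gtrader | gtrader/strategy/support_resistence.py | calculate_resistance_price
-- ===== SOURCE A (Python) =====
-- def calculate_resistance_price(mid, rn, high_price):
--     for row in range(mid - rn + 1, mid + 1):
--         if high_price[row] < high_price[row - 1]:
--             return 0
--
--     for row in range(mid + 1, mid + rn):
--         if high_price[row] > high_price[row - 1]:
--             return 0
--     return 1
-- ===== SOURCE B (Python) =====
-- def calculate_resistance_price(mid, rn, high_price):
--     if rn <= 0:
--         return 1
--     window = [high_price[i] for i in range(mid - rn, mid + rn)]
--     asc = window[:rn + 1]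
--     desc = window[rn:]
--     return 1 if asc == sorted(asc) and desc == sorted(desc, reverse=True) else 0
-- ===== Notes on version B (the rewrite author's own statement) =====
-- stated objective: idiomatic
-- what changed: A's two element-by-element scanning loops with early returns are replaced by gathering the index window into a list, splitting it at mid, and testing monotonicity of each half by comparing it with its stable sorted form (sorted / sorted(reverse=True)), with a trivial early return 1 for a nonpositive window radius.
-- outside the precondition, e.g. on calculate_resistance_price(1, 3, [1, 0]): A returns 0, B raises IndexError
import Mathlib
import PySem

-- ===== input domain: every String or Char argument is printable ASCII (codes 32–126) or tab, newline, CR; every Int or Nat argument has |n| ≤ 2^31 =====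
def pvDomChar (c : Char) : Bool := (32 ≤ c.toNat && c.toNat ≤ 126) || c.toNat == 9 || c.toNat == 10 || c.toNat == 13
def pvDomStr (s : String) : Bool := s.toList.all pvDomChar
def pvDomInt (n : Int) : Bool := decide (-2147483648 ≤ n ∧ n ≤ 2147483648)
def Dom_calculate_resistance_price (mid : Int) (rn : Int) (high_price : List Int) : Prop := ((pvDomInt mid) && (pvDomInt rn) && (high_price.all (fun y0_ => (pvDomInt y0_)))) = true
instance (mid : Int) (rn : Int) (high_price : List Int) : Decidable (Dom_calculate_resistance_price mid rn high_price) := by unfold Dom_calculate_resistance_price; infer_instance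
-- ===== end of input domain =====

-- B replaces A's two element-by-element scanning loops by slicing the ascending and descending
-- windows and comparing each slice with its (stable) sorted form; objective: idiomatic, not faster.

-- ===== PORT A =====
-- first loop of A: returns some 0 on the early `return 0`, none if the loop falls through
def crpLoop1 (hp : List Int) : List Int → Option Int
  | [] => none
  | row :: rest =>
    if PySem.List.pyGetD hp row 0 < PySem.List.pyGetD hp (row - 1) 0 then some 0
    else crpLoop1 hp rest

-- second loop of A
def crpLoop2 (hp : List Int) : List Int → Option Int
  | [] => none
  | row :: rest =>
    if PySem.List.pyGetD hp (row - 1) 0 < PySem.List.pyGetD hp row 0 then some 0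
    else crpLoop2 hp rest

def calculate_resistance_price (mid : Int) (rn : Int) (high_price : List Int) : Int :=
  match crpLoop1 high_price (PySem.List.pyRange (mid - rn + 1) (mid + 1)) with
  | some v => v
  | none =>
    match crpLoop2 high_price (PySem.List.pyRange (mid + 1) (mid + rn)) with
    | some v => v
    | none => 1

-- ===== PORT B =====
def calculate_resistance_price_alt (mid : Int) (rn : Int) (high_price : List Int) : Int :=
  if rn ≤ 0 then 1
  else
    let window := (PySem.List.pyRange (mid - rn) (mid + rn)).map
      (fun i => PySem.List.pyGetD high_price i 0)
    let asc := PySem.List.slice window none (some (rn + 1))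
    let desc := PySem.List.slice window (some rn) none
    if asc = PySem.List.sorted asc (fun x => x) ∧ desc = PySem.List.sorted desc (fun x => x) true
    then 1 else 0

-- ===== PRECONDITION & SPEC =====
-- Pre_ excludes (for positive rn) windows [mid-rn, mid+rn-1] that leave Python's wrap-indexing
-- range of high_price: there A raises IndexError, except when it hits a violation and returns 0
-- before reaching the out-of-range read (B raises there).
def Pre_calculate_resistance_price (mid : Int) (rn : Int) (high_price : List Int) : Prop :=
  rn ≤ 0 ∨ (-(high_price.length : Int) ≤ mid - rn ∧ mid + rn ≤ (high_price.length : Int))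
instance (mid : Int) (rn : Int) (high_price : List Int) : Decidable (Pre_calculate_resistance_price mid rn high_price) := by unfold Pre_calculate_resistance_price; infer_instance

def pvWitness_calculate_resistance_price : Int × Int × List Int := (2, 1, [1, 2, 1])

def Spec_calculate_resistance_price (mid : Int) (rn : Int) (high_price : List Int) (out : Int) : Prop := out = calculate_resistance_price_alt mid rn high_price
instance (mid : Int) (rn : Int) (high_price : List Int) (out : Int) : Decidable (Spec_calculate_resistance_price mid rn high_price out) := by unfold Spec_calculate_resistance_price; infer_instance

-- ===== CLAIM (what is proved, stated in full; the proofs are below) =====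
def Claim_equal_calculate_resistance_price : Prop := ∀ (mid : Int) (rn : Int) (high_price : List Int), Dom_calculate_resistance_price mid rn high_price → Pre_calculate_resistance_price mid rn high_price → Spec_calculate_resistance_price mid rn high_price (calculate_resistance_price mid rn high_price)

-- ===== LEMMAS AND PROOFS =====

lemma crpLoop1_cases (hp : List Int) (rows : List Int) :
    crpLoop1 hp rows = none ∨ crpLoop1 hp rows = some 0 := by
  induction rows with
  | nil => left; rfl
  | cons r t ih =>
    by_cases h : PySem.List.pyGetD hp r 0 < PySem.List.pyGetD hp (r - 1) 0
    · right; simp [crpLoop1, h]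
    · simpa [crpLoop1, h] using ih

lemma crpLoop2_cases (hp : List Int) (rows : List Int) :
    crpLoop2 hp rows = none ∨ crpLoop2 hp rows = some 0 := by
  induction rows with
  | nil => left; rfl
  | cons r t ih =>
    by_cases h : PySem.List.pyGetD hp (r - 1) 0 < PySem.List.pyGetD hp r 0
    · right; simp [crpLoop2, h]
    · simpa [crpLoop2, h] using ih

lemma crpLoop1_none_iff (hp : List Int) (rows : List Int) :
    crpLoop1 hp rows = none ↔
      ∀ row ∈ rows, PySem.List.pyGetD hp (row - 1) 0 ≤ PySem.List.pyGetD hp row 0 := by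
  induction rows with
  | nil => simp [crpLoop1]
  | cons r t ih =>
    by_cases h : PySem.List.pyGetD hp r 0 < PySem.List.pyGetD hp (r - 1) 0
    · simp only [crpLoop1, if_pos h]
      constructor
      · intro hc; exact absurd hc (by simp)
      · intro hall; exact absurd (hall r (by simp)) (by omega)
    · simp only [crpLoop1, if_neg h]
      rw [ih]
      constructor
      · intro hall row hrow
        rcases List.mem_cons.mp hrow with rfl | hmem
        · omega
        · exact hall row hmem
      · intro hall row hrow; exact hall row (List.mem_cons_of_mem _ hrow)

lemma crpLoop2_none_iff (hp : List Int) (rows : List Int) :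
    crpLoop2 hp rows = none ↔
      ∀ row ∈ rows, PySem.List.pyGetD hp row 0 ≤ PySem.List.pyGetD hp (row - 1) 0 := by
  induction rows with
  | nil => simp [crpLoop2]
  | cons r t ih =>
    by_cases h : PySem.List.pyGetD hp (r - 1) 0 < PySem.List.pyGetD hp r 0
    · simp only [crpLoop2, if_pos h]
      constructor
      · intro hc; exact absurd hc (by simp)
      · intro hall; exact absurd (hall r (by simp)) (by omega)
    · simp only [crpLoop2, if_neg h]
      rw [ih]
      constructor
      · intro hall row hrow
        rcases List.mem_cons.mp hrow with rfl | hmem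
        · omega
        · exact hall row hmem
      · intro hall row hrow; exact hall row (List.mem_cons_of_mem _ hrow)

-- adjacent-pairs characterisation of Pairwise for transitive relations, in getD form
lemma pairwise_iff_adj {R : Int → Int → Prop} (htr : ∀ a b c, R a b → R b c → R a c)
    (l : List Int) :
    l.Pairwise R ↔ ∀ i : Nat, i + 1 < l.length → R (l.getD i 0) (l.getD (i + 1) 0) := by
  constructor
  · intro hp i hi
    rw [List.getD_eq_getElem l 0 (by omega), List.getD_eq_getElem l 0 hi]
    exact List.pairwise_iff_getElem.mp hp i (i + 1) (by omega) hi (by omega)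
  · induction l with
    | nil => intro _; exact List.Pairwise.nil
    | cons a t ih =>
      intro h
      have hshift : ∀ i : Nat, i + 1 < t.length → R (t.getD i 0) (t.getD (i + 1) 0) := by
        intro i hi
        have := h (i + 1) (by simp; omega)
        simpa using this
      refine List.Pairwise.cons ?_ (ih hshift)
      have aux : ∀ j : Nat, j < t.length → R a (t.getD j 0) := by
        intro j
        induction j with
        | zero =>
          intro hj
          have := h 0 (by simp; omega)
          simpa using this
        | succ k ihk =>
          intro hj
          refine htr _ _ _ (ihk (by omega)) ?_
          have := h (k + 1) (by simp; omega)
          simpa using this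
      intro b hb
      obtain ⟨j, hj, rfl⟩ := List.mem_iff_getElem.mp hb
      rw [← List.getD_eq_getElem t 0 hj]
      exact aux j hj

lemma map_pyRange_getD (f : Int → Int) (a b : Int) (i : Nat) (hi : (i : Int) < b - a) :
    ((PySem.List.pyRange a b).map f).getD i 0 = f (a + i) := by
  have h1 : i < ((PySem.List.pyRange a b).map f).length := by
    simp [PySem.List.length_pyRange_one]; omega
  rw [List.getD_eq_getElem _ 0 h1]
  simp [PySem.List.getElem_pyRange_one]

lemma take_getD (l : List Int) (n i : Nat) (hi : i < n) (hn : n ≤ l.length) :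
    (l.take n).getD i 0 = l.getD i 0 := by
  rw [List.getD_eq_getElem _ 0 (by simp; omega), List.getD_eq_getElem l 0 (by omega)]
  simp [List.getElem_take]

lemma drop_getD (l : List Int) (n i : Nat) (hi : n + i < l.length) :
    (l.drop n).getD i 0 = l.getD (n + i) 0 := by
  rw [List.getD_eq_getElem _ 0 (by simp; omega), List.getD_eq_getElem l 0 (by omega)]
  simp

-- ===== VERDICT (by name: the statement is the Claim_ definition above) =====
theorem calculate_resistance_price_spec : Claim_equal_calculate_resistance_price := by
  intro mid rn hp _ hpre
  unfold Spec_calculate_resistance_price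
  by_cases hrn : rn ≤ 0
  · -- both of A's ranges are empty; B's guard fires
    rw [calculate_resistance_price, PySem.List.pyRange_one_eq_nil (by omega),
        PySem.List.pyRange_one_eq_nil (by omega)]
    rw [calculate_resistance_price_alt, if_pos hrn]
    rfl
  · have hb : -(hp.length : Int) ≤ mid - rn ∧ mid + rn ≤ (hp.length : Int) := by
      rcases hpre with h | h
      · omega
      · exact h
    obtain ⟨h0, h1⟩ := hb
    obtain ⟨r, hr⟩ : ∃ r : Nat, (r : Int) = rn := ⟨rn.toNat, by omega⟩
    have hrpos : 1 ≤ r := by omega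
    -- the window B materialises, and its two slices
    have hwl : ((PySem.List.pyRange (mid - rn) (mid + rn)).map
        (fun j => PySem.List.pyGetD hp j 0)).length = r + r := by
      simp [PySem.List.length_pyRange_one]; omega
    have hwin : ∀ i : Nat, i < r + r →
        ((PySem.List.pyRange (mid - rn) (mid + rn)).map
          (fun j => PySem.List.pyGetD hp j 0)).getD i 0
          = PySem.List.pyGetD hp (mid - rn + i) 0 := by
      intro i hi
      exact map_pyRange_getD _ _ _ i (by omega)
    -- the common condition
    set P1 : Prop := ∀ i : Nat, i + 1 < r + 1 →
      PySem.List.pyGetD hp (mid - rn + i) 0 ≤ PySem.List.pyGetD hp (mid - rn + i + 1) 0 with hP1def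
    set P2 : Prop := ∀ i : Nat, i + 1 < r →
      PySem.List.pyGetD hp (mid + i + 1) 0 ≤ PySem.List.pyGetD hp (mid + i) 0 with hP2def
    -- B = 1 ↔ P1 ∧ P2
    have hBiff : calculate_resistance_price_alt mid rn hp = 1 ↔ (P1 ∧ P2) := by
      simp only [calculate_resistance_price_alt]
      rw [if_neg hrn]
      rw [PySem.List.slice_to _ (show (0 : Int) ≤ rn + 1 by omega),
          PySem.List.slice_from _ (show (0 : Int) ≤ rn by omega),
          show (rn + 1).toNat = r + 1 from by omega, show rn.toNat = r from by omega]
      have e1 : (((PySem.List.pyRange (mid - rn) (mid + rn)).map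
            (fun j => PySem.List.pyGetD hp j 0)).take (r + 1)
          = PySem.List.sorted (((PySem.List.pyRange (mid - rn) (mid + rn)).map
            (fun j => PySem.List.pyGetD hp j 0)).take (r + 1)) (fun x => x)) ↔ P1 := by
        have hlen : (((PySem.List.pyRange (mid - rn) (mid + rn)).map
            (fun j => PySem.List.pyGetD hp j 0)).take (r + 1)).length = r + 1 := by
          rw [List.length_take, hwl]; omega
        have hget : ∀ i : Nat, i < r + 1 →
            (((PySem.List.pyRange (mid - rn) (mid + rn)).map
              (fun j => PySem.List.pyGetD hp j 0)).take (r + 1)).getD i 0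
              = PySem.List.pyGetD hp (mid - rn + i) 0 := by
          intro i hi
          rw [take_getD _ _ _ hi (by omega), hwin i (by omega)]
        constructor
        · intro he
          have hpw := PySem.List.sorted_pairwise (((PySem.List.pyRange (mid - rn) (mid + rn)).map
            (fun j => PySem.List.pyGetD hp j 0)).take (r + 1)) (fun x => x)
          rw [← he] at hpw
          have hadj := (pairwise_iff_adj (R := fun a b => a ≤ b)
            (fun a b c hab hbc => le_trans hab hbc) _).mp hpw
          intro i hi
          have hgi := hadj i (by rw [hlen]; omega)
          rwa [hget i (by omega), hget (i + 1) (by omega),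
               show (mid - rn + ((i + 1 : Nat) : Int)) = mid - rn + i + 1 from by omega] at hgi
        · intro hP
          refine (PySem.List.sorted_eq_self_of_pairwise _ _ ?_).symm
          refine (pairwise_iff_adj (R := fun a b => a ≤ b)
            (fun a b c hab hbc => le_trans hab hbc) _).mpr ?_
          intro i hi
          rw [hlen] at hi
          rw [hget i (by omega), hget (i + 1) (by omega),
              show (mid - rn + ((i + 1 : Nat) : Int)) = mid - rn + i + 1 from by omega]
          exact hP i hi
      have e2 : (((PySem.List.pyRange (mid - rn) (mid + rn)).map
            (fun j => PySem.List.pyGetD hp j 0)).drop r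
          = PySem.List.sorted (((PySem.List.pyRange (mid - rn) (mid + rn)).map
            (fun j => PySem.List.pyGetD hp j 0)).drop r) (fun x => x) true) ↔ P2 := by
        have hlen : (((PySem.List.pyRange (mid - rn) (mid + rn)).map
            (fun j => PySem.List.pyGetD hp j 0)).drop r).length = r := by
          rw [List.length_drop, hwl]; omega
        have hget : ∀ i : Nat, i < r →
            (((PySem.List.pyRange (mid - rn) (mid + rn)).map
              (fun j => PySem.List.pyGetD hp j 0)).drop r).getD i 0
              = PySem.List.pyGetD hp (mid + i) 0 := by
          intro i hi
          rw [drop_getD _ _ _ (by omega), hwin (r + i) (by omega),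
              show (mid - rn + ((r + i : Nat) : Int)) = mid + i from by omega]
        constructor
        · intro he
          have hpw := PySem.List.sorted_pairwise_rev (((PySem.List.pyRange (mid - rn) (mid + rn)).map
            (fun j => PySem.List.pyGetD hp j 0)).drop r) (fun x => x)
          rw [← he] at hpw
          have hadj := (pairwise_iff_adj (R := fun a b => b ≤ a)
            (fun a b c hab hbc => le_trans hbc hab) _).mp hpw
          intro i hi
          have hgi := hadj i (by rw [hlen]; omega)
          rwa [hget i (by omega), hget (i + 1) (by omega),
               show (mid + ((i + 1 : Nat) : Int)) = mid + i + 1 from by omega] at hgi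
        · intro hP
          refine (PySem.List.sorted_rev_eq_self_of_pairwise _ _ ?_).symm
          refine (pairwise_iff_adj (R := fun a b => b ≤ a)
            (fun a b c hab hbc => le_trans hbc hab) _).mpr ?_
          intro i hi
          rw [hlen] at hi
          rw [hget i (by omega), hget (i + 1) (by omega),
              show (mid + ((i + 1 : Nat) : Int)) = mid + i + 1 from by omega]
          exact hP i hi
      have hif : ∀ (c : Prop) [Decidable c], ((if c then (1 : Int) else 0) = 1 ↔ c) := by
        intro c _
        split_ifs with h
        · simp [h]
        · simp [h]
      rw [hif]
      exact and_congr e1 e2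
    -- A = 1 ↔ P1 ∧ P2
    have hL1 : crpLoop1 hp (PySem.List.pyRange (mid - rn + 1) (mid + 1)) = none ↔ P1 := by
      rw [crpLoop1_none_iff]
      constructor
      · intro hall i hi
        have hrow := hall (mid - rn + 1 + (i : Int)) (PySem.List.mem_pyRange_one.mpr (by omega))
        rwa [show (mid - rn + 1 + (i : Int) - 1) = mid - rn + i from by omega,
             show (mid - rn + 1 + (i : Int)) = mid - rn + i + 1 from by omega] at hrow
      · intro hP row hrow
        obtain ⟨hl, hu⟩ := PySem.List.mem_pyRange_one.mp hrow
        obtain ⟨i, hi⟩ : ∃ i : Nat, row = mid - rn + 1 + (i : Int) :=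
          ⟨(row - (mid - rn + 1)).toNat, by omega⟩
        subst hi
        rw [show (mid - rn + 1 + (i : Int) - 1) = mid - rn + i from by omega,
            show (mid - rn + 1 + (i : Int)) = mid - rn + i + 1 from by omega]
        exact hP i (by omega)
    have hL2 : crpLoop2 hp (PySem.List.pyRange (mid + 1) (mid + rn)) = none ↔ P2 := by
      rw [crpLoop2_none_iff]
      constructor
      · intro hall i hi
        have hrow := hall (mid + 1 + (i : Int)) (PySem.List.mem_pyRange_one.mpr (by omega))
        rwa [show (mid + 1 + (i : Int) - 1) = mid + i from by omega,
             show (mid + 1 + (i : Int)) = mid + i + 1 from by omega] at hrow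
      · intro hP row hrow
        obtain ⟨hl, hu⟩ := PySem.List.mem_pyRange_one.mp hrow
        obtain ⟨i, hi⟩ : ∃ i : Nat, row = mid + 1 + (i : Int) :=
          ⟨(row - (mid + 1)).toNat, by omega⟩
        subst hi
        rw [show (mid + 1 + (i : Int) - 1) = mid + i from by omega,
            show (mid + 1 + (i : Int)) = mid + i + 1 from by omega]
        exact hP i (by omega)
    have hBcases : calculate_resistance_price_alt mid rn hp = 0 ∨ calculate_resistance_price_alt mid rn hp = 1 := by
      simp only [calculate_resistance_price_alt]
      split_ifs <;> simp
    rcases crpLoop1_cases hp (PySem.List.pyRange (mid - rn + 1) (mid + 1)) with hc1 | hc1 <;>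
      rcases crpLoop2_cases hp (PySem.List.pyRange (mid + 1) (mid + rn)) with hc2 | hc2
    · rw [calculate_resistance_price, hc1, hc2]
      exact (hBiff.mpr ⟨hL1.mp hc1, hL2.mp hc2⟩).symm
    · rw [calculate_resistance_price, hc1, hc2]
      show (0 : Int) = _
      rcases hBcases with hb | hb
      · rw [hb]
      · exact absurd (hL2.mpr (hBiff.mp hb).2) (by simp [hc2])
    · rw [calculate_resistance_price, hc1]
      show (0 : Int) = _
      rcases hBcases with hb | hb
      · rw [hb]
      · exact absurd (hL1.mpr (hBiff.mp hb).1) (by simp [hc1])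
    · rw [calculate_resistance_price, hc1]
      show (0 : Int) = _
      rcases hBcases with hb | hb
      · rw [hb]
      · exact absurd (hL1.mpr (hBiff.mp hb).1) (by simp [hc1])
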